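-- pv_equiv track=rewrite | github.com/hanabi-bro/booyaa | booyaa/ipcalc/ipv6_inprogress.py | validate_expanded_ipv6
-- ===== SOURCE A (Python) =====
-- def validate_expanded_ipv6(expanded: str) -> bool:
--     parts = expanded.split(":")
--     if len(parts) != 8:
--         return False
--     for part in parts:
--         if not (1 <= len(part) <= 4 and all(c in "0123456789abcdefABCDEF" for c in part)):
--             return False
--     return True
-- ===== SOURCE B (Python) =====
-- def validate_expanded_ipv6(expanded: str) -> bool:
--     # Single left-to-right scan (finite-state machine) instead of split + per-part loop.
--     groups = 1
--     digits = 0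
--     for c in expanded:
--         if c == ':':
--             if digits == 0 or groups == 8:
--                 return False
--             groups += 1
--             digits = 0
--         elif c in "0123456789abcdefABCDEF":
--             digits += 1
--             if digits > 4:
--                 return False
--         else:
--             return False
--     return groups == 8 and 1 <= digits <= 4
-- ===== Notes on version B (the rewrite author's own statement) =====
-- stated objective: alternative
-- what changed: A splits the string on the colon separator and then loops over the eight parts checking length and hex digits; B never builds parts: it is a single left-to-right character scan (a small state machine tracking the group count and the digit count of the current group).
import Mathlib
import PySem

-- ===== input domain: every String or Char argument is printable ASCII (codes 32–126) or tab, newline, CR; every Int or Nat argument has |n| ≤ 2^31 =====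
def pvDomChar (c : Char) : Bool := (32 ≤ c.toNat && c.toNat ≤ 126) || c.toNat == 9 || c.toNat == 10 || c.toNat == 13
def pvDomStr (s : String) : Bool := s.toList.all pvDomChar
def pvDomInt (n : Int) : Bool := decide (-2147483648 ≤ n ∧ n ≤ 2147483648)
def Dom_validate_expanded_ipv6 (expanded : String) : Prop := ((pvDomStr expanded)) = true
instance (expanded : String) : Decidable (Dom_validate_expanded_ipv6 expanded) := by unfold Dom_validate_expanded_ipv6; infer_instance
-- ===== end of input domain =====

-- B replaces A's split-into-parts-then-check with a single-pass character scan
-- (a small state machine tracking group count and digits in the current group); objective: alternative.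


-- hex alphabet of the Python source string "0123456789abcdefABCDEF" (used by both programs)
def pvHex : List Char := "0123456789abcdefABCDEF".toList

-- ===== PORT A =====
-- `c in "0123…ABCDEF"` is ported as char membership in the literal's char list: for a
-- single character, Python's substring test `c in s` is exactly char membership.
def validate_expanded_ipv6 (expanded : String) : Bool :=
  let parts := PySem.Chars.splitOn expanded.toList [':']
  if parts.length ≠ 8 then false
  else parts.all (fun part =>
    decide (1 ≤ part.length ∧ part.length ≤ 4) && part.all (fun c => pvHex.contains c))

-- ===== PORT B =====
-- the for-loop of Source B: state = (groups so far, digits in the current group)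
def pvScan : List Char → Nat → Nat → Bool
  | [], g, d => decide (g = 8 ∧ 1 ≤ d ∧ d ≤ 4)
  | c :: rest, g, d =>
    if c = ':' then
      if d = 0 ∨ g = 8 then false else pvScan rest (g + 1) 0
    else if pvHex.contains c then
      if d + 1 > 4 then false else pvScan rest g (d + 1)
    else false

def validate_expanded_ipv6_alt (expanded : String) : Bool :=
  pvScan expanded.toList 1 0

-- ===== PRECONDITION & SPEC =====
def Spec_validate_expanded_ipv6 (expanded : String) (out : Bool) : Prop := out = validate_expanded_ipv6_alt expanded
instance (expanded : String) (out : Bool) : Decidable (Spec_validate_expanded_ipv6 expanded out) := by unfold Spec_validate_expanded_ipv6; infer_instance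

-- ===== CLAIM (what is proved, stated in full; the proofs are below) =====
def Claim_equal_validate_expanded_ipv6 : Prop := ∀ (expanded : String), Dom_validate_expanded_ipv6 expanded → Spec_validate_expanded_ipv6 expanded (validate_expanded_ipv6 expanded)

-- ===== LEMMAS AND PROOFS =====

-- structural split on ':' (reference model of str.split(":"))
def pvSplitC : List Char → List (List Char)
  | [] => [[]]
  | c :: rest =>
    if c = ':' then [] :: pvSplitC rest
    else
      match pvSplitC rest with
      | [] => [[c]]      -- unreachable: pvSplitC is never []
      | p :: ps => (c :: p) :: ps

def pvOk (p : List Char) : Bool :=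
  decide (1 ≤ p.length ∧ p.length ≤ 4) && p.all (fun c => pvHex.contains c)

lemma pvSplitC_ne_nil (cs : List Char) : pvSplitC cs ≠ [] := by
  cases cs with
  | nil => simp [pvSplitC]
  | cons c rest =>
    simp only [pvSplitC]
    split
    · simp
    · split <;> simp

-- splitOn.go on a single-char separator computes pvSplitC (with the accumulators prepended)
lemma pvSplitOn_go_single (fuel : Nat) (l cur : List Char) (acc : List (List Char))
    (h : l.length < fuel) :
    PySem.Chars.splitOn.go [':'] fuel l cur acc =
      acc.reverse ++
        (match pvSplitC l with
         | [] => [cur.reverse]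
         | p :: ps => (cur.reverse ++ p) :: ps) := by
  induction fuel generalizing l cur acc with
  | zero => omega
  | succ f ih =>
    cases l with
    | nil =>
      simp [PySem.Chars.splitOn.go, pvSplitC]
    | cons c rest =>
      by_cases hc : c = ':'
      · subst hc
        have hpre : List.isPrefixOf [':'] (':' :: rest) = true := by
          simp [List.isPrefixOf]
        rw [PySem.Chars.splitOn.go]
        simp only [hpre, if_true, List.length_cons, List.length_nil,
          Nat.zero_add, List.drop_succ_cons, List.drop_zero] at *
        rw [ih rest [] (cur.reverse :: acc) (by simpa using Nat.lt_of_succ_lt_succ h)]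
        simp only [pvSplitC]
        cases hsp : pvSplitC rest with
        | nil => exact absurd hsp (pvSplitC_ne_nil rest)
        | cons p ps => simp
      · have hpre : List.isPrefixOf [':'] (c :: rest) = false := by
          simp [List.isPrefixOf]
          intro h'; exact absurd h'.symm hc
        rw [PySem.Chars.splitOn.go]
        simp only [hpre, Bool.false_eq_true, if_false]
        rw [ih rest (c :: cur) acc (by simpa using Nat.lt_of_succ_lt_succ h)]
        simp only [pvSplitC, if_neg hc]
        cases hsp : pvSplitC rest with
        | nil => exact absurd hsp (pvSplitC_ne_nil rest)
        | cons p ps => simp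

lemma pvSplitOn_single (cs : List Char) :
    PySem.Chars.splitOn cs [':'] = pvSplitC cs := by
  unfold PySem.Chars.splitOn
  rw [pvSplitOn_go_single (cs.length + 1) cs [] [] (Nat.lt_succ_self _)]
  cases hsp : pvSplitC cs with
  | nil => exact absurd hsp (pvSplitC_ne_nil cs)
  | cons p ps => simp

-- the scan computes: right number of groups ∧ every part well-formed
-- (d = digits already consumed from the head part, g = groups already opened)
lemma pvScan_eq (cs : List Char) :
    ∀ (g d : Nat), d ≤ 4 →
    pvScan cs g d =
      (decide (g + (pvSplitC cs).length = 9) &&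
       (match pvSplitC cs with
        | [] => true
        | p :: ps =>
          (decide (1 ≤ d + p.length ∧ d + p.length ≤ 4) &&
            p.all (fun c => pvHex.contains c)) && ps.all pvOk)) := by
  induction cs with
  | nil =>
    intro g d hd
    simp only [pvScan, pvSplitC, List.length_singleton]
    by_cases hg : g = 8 <;> by_cases hd1 : 1 ≤ d <;>
      first
        | (simp [hg, hd1, hd]; omega)
        | simp [hg, hd1, hd]
  | cons c rest ih =>
    intro g d hd
    by_cases hc : c = ':'
    · subst hc
      rw [show pvScan (':' :: rest) g d
            = if d = 0 ∨ g = 8 then false else pvScan rest (g + 1) 0 from by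
          simp [pvScan]]
      rw [show pvSplitC (':' :: rest) = [] :: pvSplitC rest from by simp [pvSplitC]]
      by_cases hd0 : d = 0
      · simp [hd0]
      · by_cases hg : g = 8
        · rw [if_pos (Or.inr hg)]
          have hlen := List.length_pos_of_ne_nil (pvSplitC_ne_nil rest)
          have hne : ¬ (g + ([] :: pvSplitC rest : List (List Char)).length = 9) := by
            simp [hg]; omega
          simp
          intro h _ _
          omega
        · rw [if_neg (by tauto), ih (g + 1) 0 (by omega)]
          cases hsp : pvSplitC rest with
          | nil => exact absurd hsp (pvSplitC_ne_nil rest)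
          | cons p ps =>
            have hd1 : 1 ≤ d := Nat.one_le_iff_ne_zero.mpr hd0
            simp [pvOk, hd1, hd]
            congr 1
            simp only [decide_eq_decide]
            omega
    · rw [show pvScan (c :: rest) g d
            = (if pvHex.contains c then
                 if d + 1 > 4 then false else pvScan rest g (d + 1)
               else false) from by simp [pvScan, hc]]
      rw [show pvSplitC (c :: rest)
            = (match pvSplitC rest with
               | [] => [[c]]
               | p :: ps => (c :: p) :: ps) from by simp [pvSplitC, hc]]
      cases hsp : pvSplitC rest with
      | nil => exact absurd hsp (pvSplitC_ne_nil rest)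
      | cons p ps =>
        by_cases hh : pvHex.contains c
        · by_cases hd4 : d + 1 > 4
          · have hnotlen : ¬ (1 ≤ d + (c :: p).length ∧ d + (c :: p).length ≤ 4) := by
              simp; omega
            simp [hd4]
            intro _ _ h _ _
            omega
          · rw [if_pos hh, if_neg hd4, ih g (d + 1) (by omega)]
            cases hsp2 : pvSplitC rest with
            | nil => exact absurd hsp2 (pvSplitC_ne_nil rest)
            | cons p2 ps2 =>
              rw [hsp] at hsp2
              cases hsp2
              show (decide (g + ((p :: ps) : List (List Char)).length = 9) &&
                     ((decide (1 ≤ d + 1 + p.length ∧ d + 1 + p.length ≤ 4) &&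
                       p.all fun c => pvHex.contains c) && ps.all pvOk))
                 = (decide (g + (((c :: p) :: ps) : List (List Char)).length = 9) &&
                     ((decide (1 ≤ d + (c :: p).length ∧ d + (c :: p).length ≤ 4) &&
                       (c :: p).all fun c => pvHex.contains c) && ps.all pvOk))
              have e1 : decide (g + ((p :: ps) : List (List Char)).length = 9)
                      = decide (g + (((c :: p) :: ps) : List (List Char)).length = 9) := by
                simp
              have e2 : decide (1 ≤ (d + 1) + p.length ∧ (d + 1) + p.length ≤ 4)
                      = decide (1 ≤ d + (c :: p).length ∧ d + (c :: p).length ≤ 4) := by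
                simp only [decide_eq_decide, List.length_cons]
                omega
              have hcm : c ∈ pvHex := by simpa using hh
              have e3 : (c :: p).all (fun c => pvHex.contains c)
                      = p.all (fun c => pvHex.contains c) := by
                simp [List.all_cons, hcm]
              rw [e1, e2, e3]
        · have hcm : ¬ (c ∈ pvHex) := by simpa using hh
          simp [hcm]

-- ===== VERDICT (by name: the statement is the Claim_ definition above) =====
theorem validate_expanded_ipv6_spec : Claim_equal_validate_expanded_ipv6 := by
  intro expanded _
  unfold Spec_validate_expanded_ipv6 validate_expanded_ipv6 validate_expanded_ipv6_alt
  rw [pvSplitOn_single, pvScan_eq expanded.toList 1 0 (by omega)]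
  cases hsp : pvSplitC expanded.toList with
  | nil => exact absurd hsp (pvSplitC_ne_nil expanded.toList)
  | cons p ps =>
    by_cases hlen : (p :: ps).length = 8
    · rw [if_neg (by simpa using hlen)]
      have h9 : decide (1 + ((p :: ps) : List (List Char)).length = 9) = true := by
        simp [hlen]
      show ((p :: ps).all fun part =>
              decide (1 ≤ part.length ∧ part.length ≤ 4) && part.all fun c => pvHex.contains c)
         = (decide (1 + ((p :: ps) : List (List Char)).length = 9) &&
            ((decide (1 ≤ 0 + p.length ∧ 0 + p.length ≤ 4) &&
              p.all fun c => pvHex.contains c) && ps.all pvOk))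
      rw [h9, Bool.true_and]
      have h0 : decide (1 ≤ 0 + p.length ∧ 0 + p.length ≤ 4)
              = decide (1 ≤ p.length ∧ p.length ≤ 4) := by simp
      rw [h0]
      simp only [List.all_cons]
      rfl
    · rw [if_pos (by simpa using hlen)]
      show false
         = (decide (1 + ((p :: ps) : List (List Char)).length = 9) &&
            ((decide (1 ≤ 0 + p.length ∧ 0 + p.length ≤ 4) &&
              p.all fun c => pvHex.contains c) && ps.all pvOk))
      have h9 : decide (1 + ((p :: ps) : List (List Char)).length = 9) = false := by
        simp at hlen ⊢
        omega
      rw [h9, Bool.false_and]
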